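-- pv_equiv track=rewrite | github.com/adypd97/oriC | oriC/oric.py | pattern_count_w_mis
-- ===== SOURCE A (Python) =====
-- def hamming_dist(s1, s2):
--     ''' Calculate hamming distance between
--     two strings of equal length
--     '''
--     assert len(s1) == len(s2), "strings should be of equal length"
--     mismatch = 0
--     for v1, v2 in zip(s1, s2):
--         if v1 != v2:
--             mismatch += 1
--     return mismatch
--
-- def pattern_count_w_mis(S, w, d):
--     ''' Same as pattern_count(S,w)
--     (above) but with the addition
--     flexibility of d mismatches in S
--     '''
--     len_w = len(w)
--     len_S = len(S)
--     count_w = 0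
--     S = S.upper()
--     w = w.upper()
--     # sliding window of length len_w
--     for i in range(0,len_S-len_w):
--         win = S[i:i+len_w]
--         if hamming_dist(w, win) <= d:
--             count_w += 1
--     return count_w
-- ===== SOURCE B (Python) =====
-- def pattern_count_w_mis(S, w, d):
--     ''' Column-major: keep one running mismatch count per window
--     position, update the whole vector once per pattern character,
--     then count positions whose total is <= d. '''
--     Su = S.upper()
--     wu = w.upper()
--     mism = [0] * (len(S) - len(w))      # one counter per position 0..len_S-len_w-1
--     for k, c in enumerate(wu):
--         mism = [v + (ch != c) for v, ch in zip(mism, Su[k:])]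
--     return sum(1 for v in mism if v <= d)
-- ===== Notes on version B (the rewrite author's own statement) =====
-- stated objective: alternative
-- what changed: B transposes the loops: instead of computing a full Hamming distance per window position, it keeps a vector of running mismatch counts (one per position) updated column-by-column, once per pattern character, and finally counts entries <= d; the off-by-one range(0, len_S-len_w) and the .upper() normalisation are preserved.
import Mathlib
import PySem

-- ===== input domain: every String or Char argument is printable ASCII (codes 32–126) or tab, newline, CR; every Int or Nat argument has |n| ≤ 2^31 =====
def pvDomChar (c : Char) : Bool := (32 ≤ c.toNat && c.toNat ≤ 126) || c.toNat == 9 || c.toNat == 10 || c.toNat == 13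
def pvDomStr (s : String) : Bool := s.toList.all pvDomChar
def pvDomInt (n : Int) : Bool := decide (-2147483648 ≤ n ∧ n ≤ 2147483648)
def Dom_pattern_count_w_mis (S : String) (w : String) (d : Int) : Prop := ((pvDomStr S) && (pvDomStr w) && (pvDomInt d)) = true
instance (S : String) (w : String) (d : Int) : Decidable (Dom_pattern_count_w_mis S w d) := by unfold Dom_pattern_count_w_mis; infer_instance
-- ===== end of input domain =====

-- B transposes A's loops: a vector of running mismatch counts, updated once per pattern character
-- (column-major), then counting entries ≤ d — same exact result (objective: alternative decomposition).


-- ===== PORT A =====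
-- hamming_dist: the assert always holds on A's call sites (full-length windows), so it is not a raise site
def pvHamming (s1 s2 : List Char) : Int :=
  (s1.zip s2).foldl (fun mismatch vp => if vp.1 ≠ vp.2 then mismatch + 1 else mismatch) 0

def pattern_count_w_mis (S : String) (w : String) (d : Int) : Int :=
  let len_w : Int := PySem.Str.len w
  let len_S : Int := PySem.Str.len S
  let Su : List Char := PySem.Chars.upper S.toList
  let wu : List Char := PySem.Chars.upper w.toList
  (PySem.List.pyRange 0 (len_S - len_w)).foldl
    (fun count_w i =>
      let win := PySem.List.slice Su (some i) (some (i + len_w))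
      if pvHamming wu win ≤ d then count_w + 1 else count_w) 0

-- ===== PORT B =====
def pattern_count_w_mis_alt (S : String) (w : String) (d : Int) : Int :=
  let Su : List Char := PySem.Chars.upper S.toList
  let wu : List Char := PySem.Chars.upper w.toList
  -- mism = [0] * (len(S) - len(w))
  let mism0 : List Int := PySem.List.pyRepeat [0] (PySem.Str.len S - PySem.Str.len w)
  -- for k, c in enumerate(wu): mism = [v + (ch != c) for v, ch in zip(mism, Su[k:])]
  let mism : List Int := (PySem.List.enumerate wu).foldl
    (fun mm kc =>
      (mm.zip (PySem.List.slice Su (some kc.1) none)).map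
        (fun p => p.1 + (if p.2 ≠ kc.2 then 1 else 0))) mism0
  -- sum(1 for v in mism if v <= d)
  mism.foldl (fun t v => if v ≤ d then t + 1 else t) 0

-- ===== PRECONDITION & SPEC =====
def Spec_pattern_count_w_mis (S : String) (w : String) (d : Int) (out : Int) : Prop := out = pattern_count_w_mis_alt S w d
instance (S : String) (w : String) (d : Int) (out : Int) : Decidable (Spec_pattern_count_w_mis S w d out) := by unfold Spec_pattern_count_w_mis; infer_instance

-- ===== CLAIM (what is proved, stated in full; the proofs are below) =====
def Claim_equal_pattern_count_w_mis : Prop := ∀ (S : String) (w : String) (d : Int), Dom_pattern_count_w_mis S w d → Spec_pattern_count_w_mis S w d (pattern_count_w_mis S w d)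

-- ===== LEMMAS AND PROOFS =====

-- the mismatch count as a countP (both loops compute this value)
def hamC (s1 s2 : List Char) : Int := ((s1.zip s2).countP (fun p => p.1 != p.2) : Int)

theorem pvHamming_eq_hamC (s1 s2 : List Char) : pvHamming s1 s2 = hamC s1 s2 := by
  unfold pvHamming hamC
  have h := PySem.List.foldl_count_if (fun p : Char × Char => p.1 != p.2) (s1.zip s2) 0
  simpa [bne_iff_ne] using h

theorem hamC_nil (s2 : List Char) : hamC [] s2 = 0 := by simp [hamC]

theorem hamC_cons (c x : Char) (cs xs : List Char) :
    hamC (c :: cs) (x :: xs) = (if x ≠ c then 1 else 0) + hamC cs xs := by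
  by_cases h : x = c <;> simp [hamC, h, Ne.symm, add_comm]

-- if the accumulator vector is empty, B's column loop keeps it empty
theorem fold_cols_nil (Su : List Char) (l : List (Int × Char)) :
    l.foldl (fun (mm : List Int) kc =>
      (mm.zip (PySem.List.slice Su (some kc.1) none)).map
        (fun p => p.1 + (if p.2 ≠ kc.2 then 1 else 0))) [] = [] := by
  induction l with
  | nil => rfl
  | cons y ys ih => simpa using ih

-- B's column loop invariant: folding the enumerated pattern suffix starting at offset s adds,
-- to each slot i, the Hamming distance of that suffix against the window starting at s + i
theorem fold_cols (Su : List Char) (ws : List Char) (s : Nat) (mm : List Int)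
    (h : mm.length + s + ws.length ≤ Su.length + 1) :
    (PySem.List.enumerate ws (s : Int)).foldl
      (fun (mm : List Int) kc =>
        (mm.zip (PySem.List.slice Su (some kc.1) none)).map
          (fun p => p.1 + (if p.2 ≠ kc.2 then 1 else 0))) mm
    = mm.mapIdx (fun i v => v + hamC ws ((Su.drop (s + i)).take ws.length)) := by
  induction ws generalizing s mm with
  | nil =>
    rw [PySem.List.enumerate_nil, List.foldl_nil]
    apply List.ext_getElem
    · simp
    · intro i h1 h2
      simp [hamC_nil]
  | cons c rest ih =>
    simp only [List.length_cons] at h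
    rcases mm with _ | ⟨a, mm'⟩
    · rw [PySem.List.enumerate_cons, List.foldl_cons]
      simp only [List.zip_nil_left, List.map_nil, List.mapIdx_nil]
      exact fold_cols_nil Su _
    · simp only [List.length_cons] at h
      have hs : PySem.List.slice Su (some (s : Int)) none = Su.drop s := by
        simpa using PySem.List.slice_from Su (s : Int) (Int.natCast_nonneg s)
      have hcast : ((s : Int) + 1) = ((s + 1 : Nat) : Int) := by push_cast; ring
      rw [PySem.List.enumerate_cons, List.foldl_cons]
      simp only [hs, hcast]
      set mm1 : List Int := ((a :: mm').zip (Su.drop s)).map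
        (fun p => p.1 + (if p.2 ≠ c then 1 else 0)) with hmm1
      have hlen1 : mm1.length = mm'.length + 1 := by
        simp only [hmm1, List.length_map, List.length_zip, List.length_cons,
          List.length_drop]
        omega
      rw [ih (s + 1) mm1 (by simp only [hlen1]; omega)]
      apply List.ext_getElem
      · simp [hlen1]
      · intro i h1 h2
        simp only [List.length_mapIdx, hlen1, List.length_cons] at h1 h2
        simp only [List.getElem_mapIdx]
        have hi : i < (a :: mm').length := by simp only [List.length_cons]; omega
        have hb1 : i < mm1.length := by omega
        have hbd : i < (Su.drop s).length := by simp only [List.length_drop]; omega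
        have hiz : i < ((a :: mm').zip (Su.drop s)).length := by
          simp only [List.length_zip, List.length_cons, List.length_drop]; omega
        have hsi : s + i < Su.length := by omega
        have hmm1i : mm1[i]'hb1
            = (a :: mm')[i]'hi + (if (Su.drop s)[i]'hbd ≠ c then 1 else 0) := by
          simp [hmm1, List.getElem_zip]
        have hdropg : (Su.drop s)[i]'hbd = Su[s + i]'hsi := by
          simp [List.getElem_drop]
        have hwin : (Su.drop (s + i)).take (rest.length + 1)
            = Su[s + i]'hsi :: (Su.drop (s + i + 1)).take rest.length := by
          rw [List.drop_eq_getElem_cons hsi, List.take_succ_cons]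
        have e1 : s + 1 + i = s + i + 1 := by omega
        simp only [List.length_cons, e1]
        rw [hwin, hamC_cons, hmm1i, hdropg]
        ring

-- mapIdx over a constant-0 list is a map over range
theorem mapIdx_replicate_zero (N : Nat) (f : Nat → Int) :
    (List.replicate N (0 : Int)).mapIdx (fun i v => v + f i) = (List.range N).map f := by
  apply List.ext_getElem
  · simp
  · intro i h1 h2; simp

-- the two programs agree once both strings are upper-cased lists of the same lengths
theorem core_count_eq (L W : List Char) (d : Int) :
    (PySem.List.pyRange 0 ((L.length : Int) - (W.length : Int))).foldl
      (fun (count_w : Int) i =>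
        if pvHamming W (PySem.List.slice L (some i) (some (i + (W.length : Int)))) ≤ d
        then count_w + 1 else count_w) 0
    = ((PySem.List.enumerate W).foldl
        (fun (mm : List Int) kc =>
          (mm.zip (PySem.List.slice L (some kc.1) none)).map
            (fun p => p.1 + (if p.2 ≠ kc.2 then 1 else 0)))
        (PySem.List.pyRepeat [0] ((L.length : Int) - (W.length : Int)))).foldl
        (fun t v => if v ≤ d then t + 1 else t) 0 := by
  rw [PySem.List.pyRange_one]
  simp only [sub_zero, zero_add]
  rw [List.foldl_map]
  simp only [PySem.List.slice_natCast_add, pvHamming_eq_hamC]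
  rw [PySem.List.foldl_ite_add_one]
  rw [PySem.List.pyRepeat_singleton]
  set N : Nat := ((L.length : Int) - (W.length : Int)).toNat with hNdef
  rcases Nat.eq_zero_or_pos N with hN0 | hNpos
  · rw [hN0]
    simp only [List.replicate_zero, List.range_zero]
    rw [show PySem.List.enumerate W = PySem.List.enumerate W ((0 : Nat) : Int) from by norm_num]
      at *
    rw [fold_cols_nil]
    simp
  · have hnm : W.length ≤ L.length := by omega
    rw [show PySem.List.enumerate W = PySem.List.enumerate W ((0 : Nat) : Int) from by norm_num]
    rw [fold_cols L W 0 (List.replicate N 0) (by simp only [List.length_replicate]; omega)]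
    simp only [zero_add]
    rw [mapIdx_replicate_zero N (fun k => hamC W ((L.drop k).take W.length))]
    rw [PySem.List.foldl_ite_add_one, List.countP_map]
    simp [Function.comp_def]

theorem pattern_count_w_mis_eq (S : String) (w : String) (d : Int) :
    pattern_count_w_mis S w d = pattern_count_w_mis_alt S w d := by
  simp only [pattern_count_w_mis, pattern_count_w_mis_alt, PySem.Str.len_eq]
  have hS : S.toList.length = (PySem.Chars.upper S.toList).length := by
    simp [PySem.Chars.upper]
  have hw : w.toList.length = (PySem.Chars.upper w.toList).length := by
    simp [PySem.Chars.upper]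
  simp only [hS, hw]
  exact core_count_eq (PySem.Chars.upper S.toList) (PySem.Chars.upper w.toList) d

-- ===== VERDICT (by name: the statement is the Claim_ definition above) =====
theorem pattern_count_w_mis_spec : Claim_equal_pattern_count_w_mis := by
  intro S w d _
  unfold Spec_pattern_count_w_mis
  exact pattern_count_w_mis_eq S w d
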